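-- pv_equiv track=rewrite | github.com/dima777939/ProdLogs | orders/order_direction.py | get_query_order_log
-- ===== SOURCE A (Python) =====
-- from itertools import groupby
--
-- def get_query_order_log(order_log_values):
--     order_log_values_group = groupby(
--         order_log_values, key=lambda number: number["number_container"]
--     )
--     order_log_group = [
--         {number: [query for query in queryset]}
--         for number, queryset in order_log_values_group
--     ]
--     return order_log_group
-- ===== SOURCE B (Python) =====
-- def get_query_order_log(order_log_values):
--     # Build the grouping BACK TO FRONT: walk the entries in reverse; an entry
--     # whose key matches the (already built) front group is merged into it,
--     # otherwise it opens a new front group.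
--     groups = []
--     for entry in reversed(order_log_values):
--         k = entry["number_container"]
--         if groups and k in groups[0]:
--             groups = [{k: [entry] + groups[0][k]}] + groups[1:]
--         else:
--             groups = [{k: [entry]}] + groups
--     return groups
-- ===== Notes on version B (the rewrite author's own statement) =====
-- stated objective: alternative
-- what changed: Instead of consuming forward runs with itertools.groupby, B builds the result back-to-front: it walks the entries in reverse and either merges each entry into the current front group (same key) or opens a new front group.
import Mathlib
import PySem

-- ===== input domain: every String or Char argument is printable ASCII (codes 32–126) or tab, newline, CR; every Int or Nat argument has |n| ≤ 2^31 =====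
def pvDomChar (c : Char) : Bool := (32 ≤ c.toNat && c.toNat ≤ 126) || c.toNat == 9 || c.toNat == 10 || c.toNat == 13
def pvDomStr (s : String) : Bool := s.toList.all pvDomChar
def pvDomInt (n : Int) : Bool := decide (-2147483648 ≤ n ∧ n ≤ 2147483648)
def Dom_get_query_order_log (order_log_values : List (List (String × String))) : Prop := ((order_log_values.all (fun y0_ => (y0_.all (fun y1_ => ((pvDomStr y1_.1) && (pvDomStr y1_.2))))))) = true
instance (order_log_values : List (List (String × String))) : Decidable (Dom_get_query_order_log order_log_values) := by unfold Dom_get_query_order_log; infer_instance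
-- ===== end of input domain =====

-- B builds the grouping back-to-front (reverse walk, merge into the front group)
-- instead of consuming forward runs with itertools.groupby (objective: alternative).

-- entry["number_container"]: first-match association-list lookup; Pre_ guarantees the key
-- is present (Python raises KeyError otherwise), so the .getD "" default is never used
-- on admitted inputs.
def pvKeyOf (e : List (String × String)) : String :=
  ((e.find? (fun p => p.1 == "number_container")).map Prod.snd).getD ""

-- ===== PORT A =====
-- itertools.groupby: split off the maximal run of entries whose key equals the first
-- entry's key, emit {key: run}, recurse on the rest (exact for this consumer, which
-- exhausts each queryset before advancing).
def get_query_order_log (order_log_values : List (List (String × String))) : List (List (String × List (List (String × String)))) :=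
  match order_log_values with
  | [] => []
  | x :: xs =>
    let k := pvKeyOf x
    [(k, x :: xs.takeWhile (fun y => pvKeyOf y == k))]
      :: get_query_order_log (xs.dropWhile (fun y => pvKeyOf y == k))
termination_by order_log_values.length
decreasing_by
  simp only [List.length_cons]
  exact Nat.lt_succ_of_le (List.length_dropWhile_le _ _)

-- ===== PORT B =====
-- one step of B's reversed walk: merge the entry into the front group if its key
-- matches, otherwise open a new front group
def pvStepB (e : List (String × String)) (groups : List (List (String × List (List (String × String))))) : List (List (String × List (List (String × String)))) :=
  let k := pvKeyOf e
  match groups with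
  | [(k0, items)] :: rest => if k0 == k then [(k, e :: items)] :: rest else [(k, [e])] :: ([(k0, items)] :: rest)
  | _ => [(k, [e])] :: groups

-- 'for entry in reversed(l): groups = step(entry, groups)' starting from [] is foldr
def get_query_order_log_alt (order_log_values : List (List (String × String))) : List (List (String × List (List (String × String)))) :=
  order_log_values.foldr pvStepB []

-- ===== PRECONDITION & SPEC =====
-- Pre_ excludes exactly the entries without a "number_container" key, on which both
-- Pythons raise KeyError.
def Pre_get_query_order_log (order_log_values : List (List (String × String))) : Prop :=
  ∀ e ∈ order_log_values, "number_container" ∈ e.map Prod.fst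
instance (order_log_values : List (List (String × String))) : Decidable (Pre_get_query_order_log order_log_values) := by unfold Pre_get_query_order_log; infer_instance
def pvWitness_get_query_order_log : (List (List (String × String))) :=
  [[("number_container", "1"), ("op", "cut")], [("number_container", "1")], [("number_container", "2")]]

def Spec_get_query_order_log (order_log_values : List (List (String × String))) (out : List (List (String × List (List (String × String))))) : Prop := out = get_query_order_log_alt order_log_values
instance (order_log_values : List (List (String × String))) (out : List (List (String × List (List (String × String))))) : Decidable (Spec_get_query_order_log order_log_values out) := by unfold Spec_get_query_order_log; infer_instance

-- ===== CLAIM (what is proved, stated in full; the proofs are below) =====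
def Claim_equal_get_query_order_log : Prop := ∀ (order_log_values : List (List (String × String))), Dom_get_query_order_log order_log_values → Pre_get_query_order_log order_log_values → Spec_get_query_order_log order_log_values (get_query_order_log order_log_values)

-- ===== LEMMAS AND PROOFS =====

-- one B-step applied to A's result of the tail equals A's result of the whole list
lemma pvStep_A (e : List (String × String)) (l : List (List (String × String))) :
    pvStepB e (get_query_order_log l) = get_query_order_log (e :: l) := by
  cases l with
  | nil => simp [get_query_order_log, pvStepB]
  | cons y ys =>
    rw [get_query_order_log.eq_def]
    simp only
    by_cases h : pvKeyOf y == pvKeyOf e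
    · have he : pvKeyOf y = pvKeyOf e := by exact_mod_cast eq_of_beq h
      conv_rhs => rw [get_query_order_log.eq_def]
      simp [pvStepB, he]
    · have he : pvKeyOf y ≠ pvKeyOf e := by
        intro hc; exact h (by simp [hc])
      conv_rhs => rw [get_query_order_log.eq_def]
      simp [pvStepB, he, beq_iff_eq,
        get_query_order_log.eq_def (order_log_values := y :: ys)]

-- ===== VERDICT (by name: the statement is the Claim_ definition above) =====
theorem get_query_order_log_spec : Claim_equal_get_query_order_log := by
  intro l h1 h2
  clear h1 h2
  unfold Spec_get_query_order_log get_query_order_log_alt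
  induction l with
  | nil => simp [get_query_order_log]
  | cons x xs ih => rw [List.foldr_cons, ← ih, pvStep_A]
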